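-- pv_equiv track=rewrite | github.com/simonasbuj/olympic_games | ncpc2023/A_Aperiodic Appointments/main.py | find_matching_patterns
-- ===== SOURCE A (Python) =====
-- def are_all_values_in_list_the_same(list):
--     return all(i == list[0] for i in list)
--
-- def split_string_at_character_numbers(string, how_many_parts):
--     split_at_character_number = int(len(string) / how_many_parts)
--     patterns = [string[i:i+split_at_character_number] for i in range(0, len(string), split_at_character_number)]
--     return patterns
--
-- def find_matching_patterns(string, K):
--
--     s_reversed = string[::-1]
--
--     found_matching_pattern = False
--
--     for char_num in range(K, len(s_reversed) + 1, K):
--         patterns = split_string_at_character_numbers(s_reversed[:char_num], K)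
--         are_values_the_same = are_all_values_in_list_the_same(patterns)
--         if (are_values_the_same):
--             found_matching_pattern = True
--             break
--
--     return '1' if found_matching_pattern else '0'
-- ===== SOURCE B (Python) =====
-- def find_matching_patterns(string, K):
--     s = string[::-1]
--     n = len(s)
--     # Z-function of the reversed string, computed once:
--     # z[i] = length of the longest common prefix of s and s[i:].
--     z = [0] * (n + 1)
--     l = r = 0
--     for i in range(1, n):
--         if i < r:
--             z[i] = min(r - i, z[i - l])
--         while i + z[i] < n and s[z[i]] == s[i + z[i]]:
--             z[i] += 1
--         if i + z[i] > r:
--             l, r = i, i + z[i]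
--     # The prefix of length K*m is m identical blocks of length m repeated K
--     # times iff m is a period of that prefix, i.e. z[m] >= (K-1)*m.
--     for m in range(1, n // K + 1):
--         if z[m] >= (K - 1) * m:
--             return '1'
--     return '0'
-- ===== Notes on version B (the rewrite author's own statement) =====
-- stated objective: alternative
-- what changed: Instead of re-splitting every multiple-of-K reversed prefix into K chunks and comparing them all, B computes the Z-function of the reversed string once and decides each candidate block length m with the single arithmetic test z[m] >= (K-1)*m; it trades A's early-exit rescans for one linear preprocessing pass.
import Mathlib
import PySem

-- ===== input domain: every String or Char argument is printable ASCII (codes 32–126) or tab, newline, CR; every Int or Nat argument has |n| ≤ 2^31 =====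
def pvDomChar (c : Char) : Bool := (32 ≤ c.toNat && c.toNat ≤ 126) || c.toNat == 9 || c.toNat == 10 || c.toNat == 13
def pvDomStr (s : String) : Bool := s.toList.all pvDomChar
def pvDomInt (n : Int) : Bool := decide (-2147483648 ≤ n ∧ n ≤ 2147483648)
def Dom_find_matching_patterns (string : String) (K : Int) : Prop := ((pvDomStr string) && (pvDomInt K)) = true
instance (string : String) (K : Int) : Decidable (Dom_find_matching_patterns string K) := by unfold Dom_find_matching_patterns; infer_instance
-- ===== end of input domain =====

-- B replaces A's rescan of every multiple-of-K reversed prefix by a single Z-function pass over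
-- the reversed string, then tests each block length m with the one comparison z[m] >= (K-1)*m.

-- ===== PORT A =====
-- all(i == list[0] for i in list): list[0] is evaluated lazily, so the empty list yields True
-- and the default of headD is never read.
def pvAllSameA (l : List (List Char)) : Bool := l.all (fun i => i == l.headD [])

-- split_string_at_character_numbers: int(len(string)/how_many_parts) is truncating division,
-- exact here since float division is exact for the magnitudes admitted by Dom (< 2^53).
def pvSplitA (s : List Char) (howManyParts : Int) : List (List Char) :=
  (PySem.List.pyRange 0 (PySem.List.len s) (PySem.Int.truncdiv (PySem.List.len s) howManyParts)).map
    (fun i => PySem.List.slice s (some i) (some (i + PySem.Int.truncdiv (PySem.List.len s) howManyParts)))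

-- the flag-and-break loop over range(K, len(s_reversed) + 1, K) is List.any;
-- string[::-1] is reversal
def find_matching_patterns (string : String) (K : Int) : String :=
  let sReversed := string.toList.reverse
  if (PySem.List.pyRange K (PySem.List.len sReversed + 1) K).any
       (fun charNum => pvAllSameA (pvSplitA (PySem.List.slice sReversed none (some charNum)) K))
  then "1" else "0"

-- ===== PORT B =====
-- the while loop 'while i + z[i] < n and s[z[i]] == s[i + z[i]]: z[i] += 1';
-- both indexings are in range exactly because the guard holds (k ≤ i + k < n), so getD is exact.
def pvExtend (s : List Char) (i : Nat) (k : Nat) : Nat :=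
  if h : i + k < s.length ∧ s.getD k ' ' = s.getD (i + k) ' ' then
    pvExtend s i (k + 1)
  else k
termination_by s.length - (i + k)
decreasing_by have := h.1; omega

-- one iteration of 'for i in range(1, n)': state (z, l, r); the z entries are Python ints that
-- are always ≥ 0 (0, a min of a difference under the guard i < r, or incremented), so Nat is exact.
def pvZStep (s : List Char) (st : List Nat × Nat × Nat) (i : Nat) : List Nat × Nat × Nat :=
  let z := st.1
  let l := st.2.1
  let r := st.2.2
  let z := if i < r then z.set i (min (r - i) (z.getD (i - l) 0)) else z
  let zi := pvExtend s i (z.getD i 0)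
  let z := z.set i zi
  if i + zi > r then (z, i, i + zi) else (z, l, r)

-- z[m] is in range because 1 ≤ m ≤ n//K ≤ n < len(z), so m.toNat/getD are exact.
def find_matching_patterns_alt (string : String) (K : Int) : String :=
  let s := string.toList.reverse
  let n := s.length
  let res := (List.range' 1 (n - 1)).foldl (pvZStep s) (List.replicate (n + 1) 0, 0, 0)
  let z := res.1
  if (PySem.List.pyRange 1 (PySem.Int.floordiv (n : Int) K + 1) 1).any
       (fun m => decide ((K - 1) * m ≤ ((z.getD m.toNat 0 : Nat) : Int)))
  then "1" else "0"

-- ===== PRECONDITION & SPEC =====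
-- K = 0 is excluded: there A raises ValueError (range step 0) and B raises ZeroDivisionError.
def Pre_find_matching_patterns (string : String) (K : Int) : Prop := K ≠ 0
instance (string : String) (K : Int) : Decidable (Pre_find_matching_patterns string K) := by
  unfold Pre_find_matching_patterns; infer_instance
def pvWitness_find_matching_patterns : String × Int := ("abab", 2)

def Spec_find_matching_patterns (string : String) (K : Int) (out : String) : Prop := out = find_matching_patterns_alt string K
instance (string : String) (K : Int) (out : String) : Decidable (Spec_find_matching_patterns string K out) := by unfold Spec_find_matching_patterns; infer_instance

-- ===== CLAIM (what is proved, stated in full; the proofs are below) =====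
def Claim_equal_find_matching_patterns : Prop := ∀ (string : String) (K : Int), Dom_find_matching_patterns string K → Pre_find_matching_patterns string K → Spec_find_matching_patterns string K (find_matching_patterns string K)

-- ===== LEMMAS AND PROOFS =====

-- ---------- A-side characterisation (A's loop ⟺ ∃ m, s[:K*m] == s[:m]*K) ----------

-- A's chunk list, in recursive form: k blocks of size mm peeled off the front.
def pvChunks : Nat → Nat → List Char → List (List Char)
  | 0, _, _ => []
  | k+1, mm, l => l.take mm :: pvChunks k mm (l.drop mm)

lemma pv_chunks_map (k mm : Nat) : ∀ l : List Char,
    (List.range k).map (fun j => (l.drop (mm*j)).take mm) = pvChunks k mm l := by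
  induction k with
  | zero => intro l; simp [pvChunks]
  | succ k ih =>
    intro l
    rw [List.range_succ_eq_map]
    simp only [List.map_cons, List.map_map, pvChunks]
    congr 1
    · rw [← ih (l.drop mm)]
      refine List.map_congr_left (fun j _ => ?_)
      simp only [Function.comp_apply, List.drop_drop]
      congr 2
      simp only [Nat.succ_eq_add_one, Nat.mul_add, Nat.mul_one]
      omega

lemma pv_chunks_headD (k mm : Nat) (l : List Char) (hk : 0 < k) :
    (pvChunks k mm l).headD [] = l.take mm := by
  cases k with
  | zero => omega
  | succ k => rfl

lemma pv_allsame_eq (mm : Nat) (c : List Char) (hc : c.length = mm) :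
    ∀ (k : Nat) (l : List Char), l.length = k*mm →
      ((pvChunks k mm l).all (fun i => i == c)) = (l == (List.replicate k c).flatten) := by
  intro k
  induction k with
  | zero =>
    intro l hl
    have : l = [] := List.eq_nil_of_length_eq_zero (by simpa using hl)
    subst this
    simp [pvChunks]
  | succ k ih =>
    intro l hl
    have hdlen : (l.drop mm).length = k * mm := by
      simp only [List.length_drop, hl]
      ring_nf
      omega
    simp only [pvChunks, List.all_cons, List.replicate_succ, List.flatten_cons]
    rw [ih (l.drop mm) hdlen]
    by_cases h : l.take mm = c
    · have hsplit : l = c ++ l.drop mm := by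
        conv_lhs => rw [← List.take_append_drop mm l]
        rw [h]
      rw [Bool.eq_iff_iff]
      simp only [Bool.and_eq_true, beq_iff_eq, h, true_and]
      constructor
      · intro hd
        rw [hsplit, hd]
      · intro he
        have h2 : c ++ l.drop mm = c ++ (List.replicate k c).flatten := by rw [← hsplit]; exact he
        exact List.append_cancel_left h2
    · have h1 : (l.take mm == c) = false := by simpa using h
      rw [h1, Bool.false_and]
      symm
      rw [beq_eq_false_iff_ne]
      intro he
      apply h
      rw [he]
      exact List.take_left' hc

-- A's split-and-compare on the prefix of length k*mm equals the replication comparison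
lemma pv_core (s : List Char) (k mm : Nat) (hk : 0 < k) (hm : 0 < mm) (hle : k*mm ≤ s.length) :
    pvAllSameA (pvSplitA (s.take (k*mm)) (k : Int))
      = ((s.take (k*mm)) == (List.replicate k (s.take mm)).flatten) := by
  set l := s.take (k*mm) with hldef
  have hlen : l.length = k*mm := by
    simp [hldef, List.length_take, Nat.min_eq_left hle]
  have hsa : PySem.Int.truncdiv (PySem.List.len l) (k : Int) = (mm : Int) := by
    simp only [PySem.List.len_eq, hlen]
    show ((k*mm : Nat) : Int).tdiv (k : Int) = (mm : Int)
    rw [← Int.ofNat_tdiv]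
    norm_cast
    exact Nat.mul_div_cancel_left mm hk
  have hpos : (0 : Int) < ((k*mm : Nat) : Int) := by
    have : 0 < k * mm := Nat.mul_pos hk hm
    exact_mod_cast this
  have hcnt : (if (0:Int) < ((k*mm : Nat) : Int)
      then ((((k*mm : Nat) : Int) - 0 + (mm : Int) - 1) / (mm : Int)).toNat else 0) = k := by
    rw [if_pos hpos]
    have he : ((k*mm : Nat) : Int) - 0 + (mm : Int) - 1 = ((k*mm + mm - 1 : Nat) : Int) := by
      push_cast
      omega
    rw [he, ← Int.natCast_div, Int.toNat_natCast]
    have harr : (k*mm + mm - 1) = (mm - 1) + mm * k := by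
      rw [Nat.mul_comm]
      omega
    rw [harr, Nat.add_mul_div_left _ _ hm, Nat.div_eq_of_lt (by omega)]
    omega
  have hcount : PySem.List.pyRange 0 (PySem.List.len l) (PySem.Int.truncdiv (PySem.List.len l) (k : Int))
      = (List.range k).map (fun j : Nat => (0 : Int) + (mm : Int) * (j : Int)) := by
    rw [hsa]
    simp only [PySem.List.len_eq, hlen]
    rw [PySem.List.pyRange_of_pos 0 ((k*mm : Nat) : Int) (by exact_mod_cast hm), hcnt]
  unfold pvAllSameA pvSplitA
  rw [hcount, hsa, List.map_map]
  have hmap : ((fun i => PySem.List.slice l (some i) (some (i + (mm : Int)))) ∘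
      (fun j : Nat => (0 : Int) + (mm : Int) * (j : Int)) : Nat → List Char) =
      (fun j : Nat => (l.drop (mm*j)).take mm) := by
    funext j
    simp only [Function.comp_apply, zero_add]
    rw [show ((mm : Int) * (j : Int)) = ((mm*j : Nat) : Int) by push_cast; ring]
    exact PySem.List.slice_natCast_add l (mm*j) mm
  rw [hmap, pv_chunks_map k mm l, pv_chunks_headD k mm l hk]
  have hc : (l.take mm).length = mm := by
    rw [List.length_take, hlen]
    exact Nat.min_eq_left (Nat.le_mul_of_pos_left mm hk)
  rw [pv_allsame_eq mm (l.take mm) hc k l hlen]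
  have hts : l.take mm = s.take mm := by
    rw [hldef, List.take_take]
    congr 1
    exact Nat.min_eq_left (Nat.le_mul_of_pos_left mm hk)
  rw [hts]

-- Int-level form of pv_core, phrased on the ports' slice expressions
lemma pv_point (s : List Char) (K m : Int) (hK : 0 < K) (hm : 0 < m)
    (hle : K*m ≤ (s.length : Int)) :
    pvAllSameA (pvSplitA (PySem.List.slice s none (some (K*m))) K)
      = (PySem.List.slice s none (some (K*m)) == PySem.List.pyRepeat (PySem.List.slice s none (some m)) K) := by
  obtain ⟨k, rfl⟩ : ∃ k : Nat, K = (k : Int) := ⟨K.toNat, (Int.toNat_of_nonneg hK.le).symm⟩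
  obtain ⟨mm, rfl⟩ : ∃ mm : Nat, m = (mm : Int) := ⟨m.toNat, (Int.toNat_of_nonneg hm.le).symm⟩
  have hk : 0 < k := by exact_mod_cast hK
  have hmm : 0 < mm := by exact_mod_cast hm
  have hle' : k*mm ≤ s.length := by exact_mod_cast hle
  rw [show ((k : Int)*(mm : Int)) = ((k*mm : Nat) : Int) by push_cast; ring]
  rw [PySem.List.slice_to s (by positivity), PySem.List.slice_to s (by positivity)]
  unfold PySem.List.pyRepeat
  simp only [Int.toNat_natCast]
  exact pv_core s k mm hk hmm hle'

-- the two any-loops of A and of the replication form agree for every K ≠ 0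
lemma pv_any_eq (s : List Char) (K : Int) (hPre : K ≠ 0) :
    ((PySem.List.pyRange K ((s.length : Int) + 1) K).any
       (fun charNum => pvAllSameA (pvSplitA (PySem.List.slice s none (some charNum)) K)))
    = ((PySem.List.pyRange 1 (PySem.Int.floordiv (s.length : Int) K + 1) 1).any
       (fun m => PySem.List.slice s none (some (K * m)) == PySem.List.pyRepeat (PySem.List.slice s none (some m)) K)) := by
  rcases lt_or_gt_of_ne hPre with hK | hK
  · -- K < 0: both ranges are empty
    have hA : PySem.List.pyRange K ((s.length : Int) + 1) K = [] := by
      rw [PySem.List.pyRange]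
      rw [if_neg hPre, if_neg (by omega : ¬ (0:Int) < K), if_neg (by omega : ¬ (s.length : Int) + 1 < K)]
      simp
    have hq : PySem.Int.floordiv (s.length : Int) K ≤ 0 := by
      have h := PySem.Int.floordiv_mul_add_mod (s.length : Int) K
      have hb := PySem.Int.mod_neg_bounds (s.length : Int) hK
      by_contra hc
      push_neg at hc
      nlinarith [mul_le_mul_of_nonneg_left (show K ≤ -1 by omega) (show (0:Int) ≤ PySem.Int.floordiv (s.length : Int) K by omega)]
    rw [hA, PySem.List.pyRange_one_eq_nil (by omega)]
    rfl
  · -- 0 < K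
    rw [Bool.eq_iff_iff]
    simp only [List.any_eq_true]
    constructor
    · rintro ⟨cn, hmem, hP⟩
      rw [PySem.List.mem_pyRange_iff_of_pos hK] at hmem
      obtain ⟨h1, h2, h3⟩ := hmem
      have hdvd : K ∣ cn := by
        have hd := dvd_add h3 (dvd_refl K)
        simpa using hd
      obtain ⟨m, rfl⟩ := hdvd
      have hm : 0 < m := by nlinarith
      have hle : K*m ≤ (s.length : Int) := by omega
      refine ⟨m, ?_, ?_⟩
      · rw [PySem.List.mem_pyRange_one]
        refine ⟨by omega, ?_⟩
        rw [Int.lt_add_one_iff, PySem.Int.le_floordiv_iff_mul_le hK]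
        nlinarith
      · rw [← pv_point s K m hK hm hle]
        exact hP
    · rintro ⟨m, hmem, hQ⟩
      rw [PySem.List.mem_pyRange_one] at hmem
      obtain ⟨h1, h2⟩ := hmem
      have hle : K*m ≤ (s.length : Int) := by
        rw [Int.lt_add_one_iff, PySem.Int.le_floordiv_iff_mul_le hK] at h2
        nlinarith
      refine ⟨K*m, ?_, ?_⟩
      · rw [PySem.List.mem_pyRange_iff_of_pos hK]
        exact ⟨by nlinarith, by omega, ⟨m - 1, by ring⟩⟩
      · rw [pv_point s K m hK (by omega) hle]
        exact hQ

-- ---------- B-side: correctness of the Z-function pass ----------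

-- s and s[i:] agree on their first t characters
def pvAgree (s : List Char) (i t : Nat) : Prop := ∀ j, j < t → s[i+j]? = s[j]?

-- v is exactly the longest common prefix of s and s[i:]
def pvIsLcp (s : List Char) (i v : Nat) : Prop :=
  v ≤ s.length - i ∧ pvAgree s i v ∧ (i + v < s.length → s.getD v ' ' ≠ s.getD (i + v) ' ')

lemma pv_getD_eq (s : List Char) (j : Nat) (h : j < s.length) : s.getD j ' ' = s[j] :=
  List.getD_eq_getElem s ' ' h

lemma pvAgree_mono (s : List Char) (i t t' : Nat) (h : t' ≤ t) (ha : pvAgree s i t) :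
    pvAgree s i t' := fun j hj => ha j (lt_of_lt_of_le hj h)

lemma pvExtend_correct (s : List Char) (i : Nat) :
    ∀ fuel k, s.length ≤ i + k + fuel → k ≤ s.length - i → pvAgree s i k →
      pvIsLcp s i (pvExtend s i k) := by
  intro fuel
  induction fuel with
  | zero =>
    intro k hf hk ha
    rw [pvExtend, dif_neg (by omega)]
    exact ⟨hk, ha, fun hlt => absurd hlt (by omega)⟩
  | succ f ih =>
    intro k hf hk ha
    rw [pvExtend]
    by_cases h : i + k < s.length ∧ s.getD k ' ' = s.getD (i + k) ' '
    · rw [dif_pos h]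
      obtain ⟨hlt, hc⟩ := h
      refine ih (k+1) (by omega) (by omega) ?_
      intro j hj
      rcases Nat.lt_succ_iff_lt_or_eq.mp hj with hj' | rfl
      · exact ha j hj'
      · rw [List.getElem?_eq_getElem hlt, List.getElem?_eq_getElem (by omega : j < s.length)]
        rw [pv_getD_eq s j (by omega), pv_getD_eq s (i+j) hlt] at hc
        exact congrArg some hc.symm
    · rw [dif_neg h]
      refine ⟨hk, ha, fun hlt => ?_⟩
      intro hceq
      exact h ⟨hlt, hceq⟩

-- the loop invariant of the Z pass after the iterations i' < i have run
def pvZInv (s : List Char) (i : Nat) (st : List Nat × Nat × Nat) : Prop :=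
  st.1.length = s.length + 1 ∧
  (∀ j, 1 ≤ j → j < i → pvIsLcp s j (st.1.getD j 0)) ∧
  (∀ j, i ≤ j → st.1.getD j 0 = 0) ∧
  ((st.2.1 = 0 ∧ st.2.2 = 0) ∨
    (1 ≤ st.2.1 ∧ st.2.1 < i ∧ st.2.2 = st.2.1 + st.1.getD st.2.1 0))

lemma pv_getD_set_self (z : List Nat) (i a : Nat) (h : i < z.length) :
    (z.set i a).getD i 0 = a := by
  simp [List.getD, h]

lemma pv_getD_set_ne (z : List Nat) (i j a : Nat) (h : j ≠ i) :
    (z.set i a).getD j 0 = z.getD j 0 := by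
  simp [List.getD, List.getElem?_set_ne (fun he => h he.symm)]

lemma pvZStep_inv (s : List Char) (i : Nat) (st : List Nat × Nat × Nat)
    (h : pvZInv s i st) (h1 : 1 ≤ i) (h2 : i < s.length) :
    pvZInv s (i+1) (pvZStep s st i) := by
  obtain ⟨z, l, r⟩ := st
  obtain ⟨hlen, hdone, hzero, hlr⟩ := h
  simp only at hlen hdone hzero hlr
  unfold pvZStep
  simp only
  set z1 := if i < r then z.set i (min (r - i) (z.getD (i - l) 0)) else z with hz1
  have hz1len : z1.length = s.length + 1 := by
    rw [hz1]; split_ifs <;> simp [hlen]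
  have hz1ne : ∀ j, j ≠ i → z1.getD j 0 = z.getD j 0 := by
    intro j hj
    rw [hz1]; split_ifs with hir
    · exact pv_getD_set_ne z i j _ hj
    · rfl
  -- the start value satisfies the matching invariant of the while loop
  have hk0 : z1.getD i 0 ≤ s.length - i ∧ pvAgree s i (z1.getD i 0) := by
    by_cases hir : i < r
    · rcases hlr with ⟨_, hr0⟩ | ⟨hl1, hli, hr⟩
      · omega
      have hlcpl := hdone l hl1 hli
      have hlcpil := hdone (i - l) (by omega) (by omega)
      rw [hz1, if_pos hir, pv_getD_set_self z i _ (by omega)]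
      have hrlen : r ≤ s.length := by
        have := hlcpl.1; omega
      constructor
      · omega
      · intro j hj
        have hj1 : i + j < r := by omega
        have hj2 : (i - l) + j < z.getD l 0 := by omega
        have hj3 : j < z.getD (i - l) 0 := by omega
        have e1 : s[l + ((i - l) + j)]? = s[(i - l) + j]? := hlcpl.2.1 _ hj2
        have e2 : s[(i - l) + j]? = s[j]? := hlcpil.2.1 _ hj3
        have : i + j = l + ((i - l) + j) := by omega
        rw [this, e1, e2]
    · rw [hz1, if_neg hir, hzero i (le_refl i)]
      exact ⟨by omega, fun j hj => absurd hj (by omega)⟩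
  set zi := pvExtend s i (z1.getD i 0) with hzi
  have hlcpi : pvIsLcp s i zi :=
    pvExtend_correct s i (s.length - (i + z1.getD i 0)) (z1.getD i 0)
      (by omega) hk0.1 hk0.2
  set z2 := z1.set i zi with hz2
  have hz2len : z2.length = s.length + 1 := by rw [hz2]; simp [hz1len]
  have hz2i : z2.getD i 0 = zi := pv_getD_set_self z1 i zi (by omega)
  have hz2ne : ∀ j, j ≠ i → z2.getD j 0 = z.getD j 0 := by
    intro j hj
    rw [hz2, pv_getD_set_ne z1 i j zi hj]
    exact hz1ne j hj
  have hmain : ∀ (l' r' : Nat),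
      ((l' = 0 ∧ r' = 0) ∨ (1 ≤ l' ∧ l' < i + 1 ∧ r' = l' + z2.getD l' 0)) →
      pvZInv s (i+1) (z2, l', r') := by
    intro l' r' hlr'
    refine ⟨hz2len, ?_, ?_, hlr'⟩
    · intro j hj1 hji
      rcases Nat.lt_succ_iff_lt_or_eq.mp hji with hj | rfl
      · rw [hz2ne j (by omega)]
        exact hdone j hj1 hj
      · rw [hz2i]
        exact hlcpi
    · intro j hj
      rw [hz2ne j (by omega)]
      exact hzero j (by omega)
  split_ifs with hgt
  · exact hmain i (i + zi) (Or.inr ⟨h1, by omega, by rw [hz2i]⟩)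
  · rcases hlr with ⟨hl0, hr0⟩ | ⟨hl1, hli, hr⟩
    · omega
    · exact hmain l r (Or.inr ⟨hl1, by omega, by rw [hz2ne l (by omega)]; exact hr⟩)

lemma pvZInv_init (s : List Char) :
    pvZInv s 1 (List.replicate (s.length + 1) 0, 0, 0) := by
  refine ⟨by simp, fun j hj1 hj2 => absurd (lt_of_le_of_lt hj1 hj2) (lt_irrefl 1), ?_,
    Or.inl ⟨rfl, rfl⟩⟩
  intro j _
  simp only [List.getD, List.getElem?_replicate]
  split_ifs <;> rfl

lemma pvZFold_inv (s : List Char) : ∀ t, t ≤ s.length - 1 →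
    pvZInv s (1 + t)
      ((List.range' 1 t).foldl (pvZStep s) (List.replicate (s.length + 1) 0, 0, 0)) := by
  intro t
  induction t with
  | zero => intro _; exact pvZInv_init s
  | succ t ih =>
    intro ht
    rw [List.range'_1_concat, List.foldl_append, List.foldl_cons, List.foldl_nil]
    have h := pvZStep_inv s (1 + t) _ (ih (by omega)) (by omega) (by omega)
    have he : 1 + (t + 1) = (1 + t) + 1 := by omega
    rw [he]
    exact h

lemma pv_z_correct (s : List Char) (m : Nat) (h1 : 1 ≤ m) (h2 : m < s.length) :
    pvIsLcp s m
      (((List.range' 1 (s.length - 1)).foldl (pvZStep s)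
          (List.replicate (s.length + 1) 0, 0, 0)).1.getD m 0) := by
  have h := pvZFold_inv s (s.length - 1) (le_refl _)
  exact h.2.1 m h1 (by omega)

-- z[m] ≥ t iff s and s[m:] agree on t characters (t within range)
lemma pv_lcp_ge_iff (s : List Char) (m v t : Nat) (hlcp : pvIsLcp s m v)
    (ht : t ≤ s.length - m) : (t ≤ v) ↔ pvAgree s m t := by
  constructor
  · exact fun h => pvAgree_mono s m v t h hlcp.2.1
  · intro ha
    by_contra hlt
    push_neg at hlt
    have hvn : m + v < s.length := by omega
    have := ha v hlt
    rw [List.getElem?_eq_getElem hvn, List.getElem?_eq_getElem (by omega : v < s.length)] at this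
    exact hlcp.2.2 hvn (by
      rw [pv_getD_eq s v (by omega), pv_getD_eq s (m+v) hvn]
      exact (Option.some_inj.mp this).symm)

-- ---------- periodicity: agreement at shift m ⟺ the prefix is k equal blocks ----------

lemma pv_flatten_rep (cs : List Char) : ∀ (k j : Nat), j < k * cs.length →
    (List.flatten (List.replicate k cs))[j]? = cs[j % cs.length]? := by
  intro k
  induction k with
  | zero => intro j hj; omega
  | succ k ih =>
    intro j hj
    rw [List.replicate_succ, List.flatten_cons]
    by_cases hjc : j < cs.length
    · rw [List.getElem?_append_left hjc, Nat.mod_eq_of_lt hjc]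
    · push_neg at hjc
      have hd : (k+1) * cs.length = k * cs.length + cs.length := by ring
      rw [List.getElem?_append_right hjc, ih (j - cs.length) (by omega),
        Nat.mod_eq_sub_mod hjc]

lemma pv_mod_cond_iff (s : List Char) (k mm : Nat) (hk : 1 ≤ k) (hm : 1 ≤ mm)
    (hle : k * mm ≤ s.length) :
    (pvAgree s mm ((k-1) * mm)) ↔ (∀ j, j < k * mm → s[j]? = s[j % mm]?) := by
  have hsum : (k-1) * mm + mm = k * mm := by
    have : (k - 1) + 1 = k := by omega
    calc (k-1) * mm + mm = ((k-1) + 1) * mm := by ring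
    _ = k * mm := by rw [this]
  constructor
  · intro ha j
    induction j using Nat.strong_induction_on with
    | _ j ihj =>
      intro hj
      by_cases hjm : j < mm
      · rw [Nat.mod_eq_of_lt hjm]
      · push_neg at hjm
        have h1 : j - mm < (k-1) * mm := by omega
        have h2 : mm + (j - mm) = j := by omega
        have := ha (j - mm) h1
        rw [h2] at this
        rw [this, ihj (j - mm) (by omega) (by omega), Nat.mod_eq_sub_mod hjm]
  · intro hmod j hj
    have h1 : mm + j < k * mm := by omega
    rw [hmod (mm + j) h1, Nat.add_mod_left, ← hmod j (by omega)]

lemma pv_period_iff (s : List Char) (k mm : Nat) (hk : 1 ≤ k) (hm : 1 ≤ mm)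
    (hle : k * mm ≤ s.length) :
    (pvAgree s mm ((k-1) * mm)) ↔
      (s.take (k * mm) = List.flatten (List.replicate k (s.take mm))) := by
  have hmn : mm ≤ s.length := le_trans (Nat.le_mul_of_pos_left mm hk) hle
  have hc : (s.take mm).length = mm := by simp [List.length_take, Nat.min_eq_left hmn]
  rw [pv_mod_cond_iff s k mm hk hm hle]
  constructor
  · intro hmod
    apply List.ext_getElem?
    intro j
    by_cases hj : j < k * mm
    · rw [List.getElem?_take_of_lt hj, pv_flatten_rep (s.take mm) k j (by rw [hc]; exact hj), hc,
        List.getElem?_take_of_lt (Nat.mod_lt j (by omega))]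
      exact hmod j hj
    · push_neg at hj
      rw [List.getElem?_eq_none (by simp [List.length_take]; omega),
        List.getElem?_eq_none]
      rw [List.length_flatten]
      simp only [List.map_replicate, List.sum_replicate, smul_eq_mul, hc]
      omega
  · intro heq j hj
    have h1 := congrArg (fun l => l[j]?) heq
    simp only at h1
    rw [List.getElem?_take_of_lt hj, pv_flatten_rep (s.take mm) k j (by rw [hc]; exact hj), hc,
      List.getElem?_take_of_lt (Nat.mod_lt j (by omega))] at h1
    exact h1

-- ---------- bridge: B's z-test equals the replication comparison, pointwise in m ----------

lemma pv_b_point (s : List Char) (K m : Int) (hK : 0 < K) (hm : 0 < m)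
    (hle : K * m ≤ (s.length : Int)) :
    (decide ((K - 1) * m ≤ ((((List.range' 1 (s.length - 1)).foldl (pvZStep s)
          (List.replicate (s.length + 1) 0, 0, 0)).1.getD m.toNat 0 : Nat) : Int)))
      = (PySem.List.slice s none (some (K * m)) ==
          PySem.List.pyRepeat (PySem.List.slice s none (some m)) K) := by
  obtain ⟨k, rfl⟩ : ∃ k : Nat, K = (k : Int) := ⟨K.toNat, (Int.toNat_of_nonneg hK.le).symm⟩
  obtain ⟨mm, rfl⟩ : ∃ mm : Nat, m = (mm : Int) := ⟨m.toNat, (Int.toNat_of_nonneg hm.le).symm⟩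
  have hk : 1 ≤ k := by exact_mod_cast hK
  have hmm : 1 ≤ mm := by exact_mod_cast hm
  have hle' : k * mm ≤ s.length := by exact_mod_cast hle
  rw [show ((k : Int) * (mm : Int)) = ((k * mm : Nat) : Int) by push_cast; ring]
  rw [PySem.List.slice_to s (by positivity), PySem.List.slice_to s (by positivity)]
  unfold PySem.List.pyRepeat
  simp only [Int.toNat_natCast]
  have hcast : ((k : Int) - 1) * (mm : Int) = (((k - 1) * mm : Nat) : Int) := by
    push_cast [Nat.cast_sub hk]
    ring
  rw [hcast]
  by_cases hk1 : k = 1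
  · subst hk1
    simp only [Nat.sub_self, Nat.zero_mul, Nat.cast_zero, List.replicate_one,
      List.flatten_cons, List.flatten_nil, List.append_nil, Nat.one_mul]
    rw [decide_eq_true (by positivity), beq_self_eq_true]
  · have hk2 : 2 ≤ k := by omega
    have hmlt : mm < s.length := by nlinarith
    have hlcp := pv_z_correct s mm hmm hmlt
    set v := ((List.range' 1 (s.length - 1)).foldl (pvZStep s)
        (List.replicate (s.length + 1) 0, 0, 0)).1.getD mm 0 with hv
    have hiff : ((k - 1) * mm ≤ v) ↔
        (s.take (k * mm) = List.flatten (List.replicate k (s.take mm))) := by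
      rw [pv_lcp_ge_iff s mm v ((k-1)*mm) hlcp (by
        have : (k-1) * mm + mm = k * mm := by
          have h : (k - 1) + 1 = k := by omega
          calc (k-1) * mm + mm = ((k-1) + 1) * mm := by ring
          _ = k * mm := by rw [h]
        omega)]
      exact pv_period_iff s k mm hk hmm hle'
    have hiff' : ((((k - 1) * mm : Nat) : Int) ≤ ((v : Nat) : Int)) ↔
        (s.take (k * mm) = List.flatten (List.replicate k (s.take mm))) := by
      rw [← hiff]; exact_mod_cast Iff.rfl
    rw [Bool.eq_iff_iff, decide_eq_true_iff, beq_iff_eq]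
    exact hiff'

-- B's any-loop equals the replication any-loop (the outer ranges are identical)
lemma pv_any_b (s : List Char) (K : Int) :
    ((PySem.List.pyRange 1 (PySem.Int.floordiv (s.length : Int) K + 1) 1).any
       (fun m => decide ((K - 1) * m ≤ ((((List.range' 1 (s.length - 1)).foldl (pvZStep s)
            (List.replicate (s.length + 1) 0, 0, 0)).1.getD m.toNat 0 : Nat) : Int))))
    = ((PySem.List.pyRange 1 (PySem.Int.floordiv (s.length : Int) K + 1) 1).any
       (fun m => PySem.List.slice s none (some (K * m)) ==
          PySem.List.pyRepeat (PySem.List.slice s none (some m)) K)) := by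
  apply PySem.List.any_congr_mem
  intro m hm
  rw [PySem.List.mem_pyRange_one] at hm
  obtain ⟨h1, h2⟩ := hm
  rcases le_or_gt K 0 with hK | hK
  · -- K ≤ 0: the range is in fact empty, contradiction with membership
    exfalso
    have hq : PySem.Int.floordiv (s.length : Int) K ≤ 0 := by
      rcases lt_or_eq_of_le hK with hK' | hK0
      case inr => subst hK0; simp [PySem.Int.floordiv]
      · have h := PySem.Int.floordiv_mul_add_mod (s.length : Int) K
        have hb := PySem.Int.mod_neg_bounds (s.length : Int) hK'
        by_contra hc
        push_neg at hc
        nlinarith [mul_le_mul_of_nonneg_left (show K ≤ -1 by omega)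
          (show (0:Int) ≤ PySem.Int.floordiv (s.length : Int) K by omega)]
    omega
  · have hle : K * m ≤ (s.length : Int) := by
      rw [Int.lt_add_one_iff, PySem.Int.le_floordiv_iff_mul_le hK] at h2
      nlinarith
    exact pv_b_point s K m hK (by omega) hle

-- ===== VERDICT (by name: the statement is the Claim_ definition above) =====
theorem find_matching_patterns_spec : Claim_equal_find_matching_patterns := by
  intro string K hDom hPre
  unfold Spec_find_matching_patterns
  simp only [find_matching_patterns, find_matching_patterns_alt, PySem.List.len_eq]
  simp only [pv_any_eq string.toList.reverse K hPre, pv_any_b string.toList.reverse K]
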